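-- pv_equiv track=rewrite | github.com/mils8545/aoc2015python | 05/main.py | part1NaughtyCheck
-- ===== SOURCE A (Python) =====
-- def part1NaughtyCheck(line):
--     naughtyCombo = ["ab", "cd", "pq", "xy"]
--     vowelCount = 0
--     for i in range(len(line)):
--         if line[i] in "aeiou":
--             vowelCount += 1
--     doubleLetter = False
--     for i in range(len(line)-1):
--         if line[i] == line[i+1]:
--             doubleLetter = True
--     naughtyComboFound = False
--     for combo in naughtyCombo:
--         if combo in line:
--             naughtyComboFound = True
--     return (vowelCount < 3 or (not doubleLetter) or naughtyComboFound)
-- ===== SOURCE B (Python) =====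
-- def part1NaughtyCheck(line):
--     bad = {"ab", "cd", "pq", "xy"}
--     vowelCount = 0
--     doubleLetter = False
--     naughtyComboFound = False
--     n = len(line)
--     for i in range(n):
--         if line[i] in "aeiou":
--             vowelCount += 1
--         if i + 1 < n:
--             if line[i] == line[i + 1]:
--                 doubleLetter = True
--             if line[i:i + 2] in bad:
--                 naughtyComboFound = True
--     return vowelCount < 3 or not doubleLetter or naughtyComboFound
-- ===== Notes on version B (the rewrite author's own statement) =====
-- stated objective: simpler
-- what changed: A's three separate passes (vowel loop, adjacent-pair loop, four whole-string substring searches) are merged into one single left-to-right pass that keeps a vowel count, a double-letter flag and a bad-pair flag tested against a set of the four two-character combos.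
import Mathlib
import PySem

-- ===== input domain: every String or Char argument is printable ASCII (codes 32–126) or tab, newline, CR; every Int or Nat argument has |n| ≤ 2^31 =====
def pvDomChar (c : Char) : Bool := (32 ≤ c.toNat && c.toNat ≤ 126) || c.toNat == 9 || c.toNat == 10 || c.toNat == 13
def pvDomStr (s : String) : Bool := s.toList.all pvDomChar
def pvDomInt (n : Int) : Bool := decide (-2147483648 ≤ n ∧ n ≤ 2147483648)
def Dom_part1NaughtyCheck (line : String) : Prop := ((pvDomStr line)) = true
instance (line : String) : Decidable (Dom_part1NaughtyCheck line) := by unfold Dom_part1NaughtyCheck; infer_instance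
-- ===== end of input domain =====

-- B replaces A's three separate passes (plus four whole-string substring searches) by one
-- left-to-right pass maintaining the vowel count, the double-letter flag and a bad-pair flag
-- checked against a set of the four two-character combos (objective: simpler).

-- ===== PORT A =====
def part1NaughtyCheck (line : String) : Bool :=
  let naughtyCombo : List (List Char) := [['a','b'], ['c','d'], ['p','q'], ['x','y']]
  let cs := line.toList
  let vowelCount : Nat :=
    (PySem.List.pyRange 0 (cs.length : Int) 1).foldl
      (fun v i => if ("aeiou".toList).contains (PySem.List.pyGetD cs i ' ') then v + 1 else v) 0
  let doubleLetter : Bool :=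
    (PySem.List.pyRange 0 ((cs.length : Int) - 1) 1).foldl
      (fun d i => if PySem.List.pyGetD cs i ' ' == PySem.List.pyGetD cs (i+1) ' ' then true else d)
      false
  let naughtyComboFound : Bool :=
    naughtyCombo.foldl (fun f combo => if PySem.Chars.isIn combo cs then true else f) false
  decide (vowelCount < 3) || !doubleLetter || naughtyComboFound

-- ===== PORT B =====
-- bad = {"ab", "cd", "pq", "xy"}  (a set of the four two-character combos)
def pvBad : PySem.Set (List Char) :=
  PySem.Set.ofList [['a','b'], ['c','d'], ['p','q'], ['x','y']]

-- the single loop of B: one step per index i; the pair tests run only while i+1 < n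
def pvAltLoop : List Char → Nat → Bool → Bool → Bool
  | [], v, d, n => decide (v < 3) || !d || n
  | [c], v, d, n =>
      decide ((if ("aeiou".toList).contains c then v + 1 else v) < 3) || !d || n
  | c1 :: c2 :: rest, v, d, n =>
      pvAltLoop (c2 :: rest)
        (if ("aeiou".toList).contains c1 then v + 1 else v)
        (if c1 == c2 then true else d)
        (if PySem.Set.contains pvBad [c1, c2] then true else n)

def part1NaughtyCheck_alt (line : String) : Bool :=
  pvAltLoop line.toList 0 false false

-- ===== PRECONDITION & SPEC =====
def Spec_part1NaughtyCheck (line : String) (out : Bool) : Prop := out = part1NaughtyCheck_alt line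
instance (line : String) (out : Bool) : Decidable (Spec_part1NaughtyCheck line out) := by unfold Spec_part1NaughtyCheck; infer_instance

-- ===== CLAIM (what is proved, stated in full; the proofs are below) =====
def Claim_equal_part1NaughtyCheck : Prop := ∀ (line : String), Dom_part1NaughtyCheck line → Spec_part1NaughtyCheck line (part1NaughtyCheck line)

-- ===== LEMMAS AND PROOFS =====

-- reference functions (proof-only helpers)
def pvVowel (c : Char) : Bool := ("aeiou".toList).contains c

def pvCountV : List Char → Nat
  | [] => 0
  | c :: r => (if pvVowel c then 1 else 0) + pvCountV r

def pvHasDouble : List Char → Bool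
  | c1 :: c2 :: r => (c1 == c2) || pvHasDouble (c2 :: r)
  | _ => false

def pvSub2 (a b : Char) : List Char → Bool
  | c1 :: c2 :: r => (c1 == a && c2 == b) || pvSub2 a b (c2 :: r)
  | _ => false

def pvHasCombo : List Char → Bool
  | c1 :: c2 :: r => PySem.Set.contains pvBad [c1, c2] || pvHasCombo (c2 :: r)
  | _ => false

lemma pv_foldl_or {α : Type} (p : α → Bool) :
    ∀ (l : List α) (b : Bool),
      l.foldl (fun acc x => if p x then true else acc) b = (b || l.any p) := by
  intro l
  induction l with
  | nil => simp
  | cons x r ih =>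
      intro b
      rw [List.foldl_cons, ih, List.any_cons]
      by_cases h : p x = true <;> cases b <;> simp [h]

lemma pv_foldl_count (p : Char → Bool) :
    ∀ (l : List Char) (v : Nat),
      l.foldl (fun v c => if p c then v + 1 else v) v
        = v + l.foldl (fun v c => if p c then v + 1 else v) 0 := by
  intro l
  induction l with
  | nil => simp
  | cons c r ih =>
      intro v
      rw [List.foldl_cons, List.foldl_cons]
      by_cases h : p c = true
      · simp only [h, if_true]
        rw [ih (v + 1), ih 1, Nat.add_assoc]
      · simp only [h]
        exact ih v

lemma pv_countV_eq : ∀ (l : List Char),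
    l.foldl (fun v c => if ("aeiou".toList).contains c then v + 1 else v) 0 = pvCountV l := by
  intro l
  induction l with
  | nil => rfl
  | cons c r ih =>
      rw [List.foldl_cons]
      show List.foldl (fun v c => if ("aeiou".toList).contains c then v + 1 else v)
          (if pvVowel c then 0 + 1 else 0) r = pvCountV (c :: r)
      by_cases h : pvVowel c = true
      · rw [if_pos h]
        simp only [pvCountV, if_pos h, Nat.zero_add]
        rw [pv_foldl_count _ r 1, ih]
      · rw [if_neg h]
        simp only [pvCountV, if_neg h, Nat.zero_add]
        exact ih

lemma pv_double_eq : ∀ (cs : List Char),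
    ((List.range (cs.length - 1)).any
        (fun k => cs.getD k ' ' == cs.getD (k + 1) ' ')) = pvHasDouble cs := by
  intro cs
  induction cs with
  | nil => rfl
  | cons c1 r ih =>
      cases r with
      | nil => rfl
      | cons c2 rr =>
          simp only [List.length_cons, Nat.add_sub_cancel, List.range_succ_eq_map,
            List.any_cons, List.any_map, pvHasDouble]
          simp only [List.getD_cons_zero, List.getD_cons_succ, Function.comp_def]
          rw [← ih]
          simp [List.length_cons]

lemma pv_infix_pair (a b : Char) : ∀ (cs : List Char),
    PySem.Chars.isIn [a, b] cs = pvSub2 a b cs := by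
  intro cs
  induction cs with
  | nil =>
      rw [Bool.eq_iff_iff, PySem.Chars.isIn_iff_infix]
      simp [pvSub2]
  | cons c1 r ih =>
      cases r with
      | nil =>
          rw [Bool.eq_iff_iff, PySem.Chars.isIn_iff_infix]
          constructor
          · intro h
            have := h.length_le
            simp at this
          · intro h; simp [pvSub2] at h
      | cons c2 rr =>
          rw [Bool.eq_iff_iff, PySem.Chars.isIn_iff_infix]
          rw [List.infix_cons_iff]
          rw [Bool.eq_iff_iff, PySem.Chars.isIn_iff_infix] at ih
          constructor
          · rintro (hp | hi)
            · rcases List.cons_prefix_cons.mp hp with ⟨rfl, hp2⟩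
              rcases List.cons_prefix_cons.mp hp2 with ⟨rfl, _⟩
              simp [pvSub2]
            · simp [pvSub2, ih.mp hi]
          · intro h
            simp only [pvSub2, Bool.or_eq_true, Bool.and_eq_true, beq_iff_eq] at h
            rcases h with ⟨rfl, rfl⟩ | h
            · exact Or.inl (List.cons_prefix_cons.mpr ⟨rfl, List.cons_prefix_cons.mpr ⟨rfl, by simp⟩⟩)
            · exact Or.inr (ih.mpr h)

lemma pv_combo_eq : ∀ (cs : List Char),
    (pvSub2 'a' 'b' cs || pvSub2 'c' 'd' cs || pvSub2 'p' 'q' cs || pvSub2 'x' 'y' cs)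
      = pvHasCombo cs := by
  intro cs
  induction cs with
  | nil => rfl
  | cons c1 r ih =>
      cases r with
      | nil => rfl
      | cons c2 rr =>
          simp only [pvSub2, pvHasCombo, ← ih]
          have hmem : PySem.Set.contains pvBad [c1, c2]
              = ((c1 == 'a' && c2 == 'b') || (c1 == 'c' && c2 == 'd')
                  || (c1 == 'p' && c2 == 'q') || (c1 == 'x' && c2 == 'y')) := by
            rw [Bool.eq_iff_iff]
            simp [pvBad, PySem.Set.ofList, PySem.Set.contains, PySem.Set.add, or_assoc]
          rw [hmem]
          ac_rfl

lemma pv_pyRange_double (cs : List Char) :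
    ((PySem.List.pyRange 0 ((cs.length : Int) - 1) 1).any
        (fun i => PySem.List.pyGetD cs i ' ' == PySem.List.pyGetD cs (i + 1) ' '))
      = ((List.range (cs.length - 1)).any
        (fun k => cs.getD k ' ' == cs.getD (k + 1) ' ')) := by
  rw [PySem.List.pyRange_one, List.any_map]
  have hn : (((cs.length : Int) - 1) - 0).toNat = cs.length - 1 := by omega
  rw [hn]
  apply List.any_congr rfl
  intro k
  have h1 : ((0 : Int) + (k : Int)) = ((k : Nat) : Int) := by omega
  have h2 : ((k : Int) + 1) = (((k + 1 : Nat)) : Int) := by push_cast; ring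
  simp only [Function.comp_def, h1, h2, PySem.List.pyGetD_natCast]

lemma pv_altLoop_eq : ∀ (cs : List Char) (v : Nat) (d n : Bool),
    pvAltLoop cs v d n
      = (decide (v + pvCountV cs < 3) || !(d || pvHasDouble cs) || (n || pvHasCombo cs)) := by
  intro cs
  induction cs with
  | nil => intro v d n; simp [pvAltLoop, pvCountV, pvHasDouble, pvHasCombo]
  | cons c1 r ih =>
      cases r with
      | nil =>
          intro v d n
          have hv : (if ("aeiou".toList).contains c1 = true then v + 1 else v)
              = v + pvCountV [c1] := by
            simp only [pvCountV, pvVowel]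
            split_ifs <;> omega
          show (decide ((if ("aeiou".toList).contains c1 = true then v + 1 else v) < 3)
              || !d || n)
            = (decide (v + pvCountV [c1] < 3) || !(d || pvHasDouble [c1]) || (n || pvHasCombo [c1]))
          rw [hv]
          simp [pvHasDouble, pvHasCombo]
      | cons c2 rr =>
          intro v d n
          rw [pvAltLoop, ih]
          simp only [pvCountV, pvHasDouble, pvHasCombo]
          rw [show (if ("aeiou".toList).contains c1 = true then v + 1 else v)
              = v + (if pvVowel c1 then 1 else 0) from by
            simp only [pvVowel]; split_ifs <;> omega]
          cases hd : (c1 == c2) <;> cases d <;>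
            cases hc : PySem.Set.contains pvBad [c1, c2] <;> cases n <;>
            try simp [Nat.add_assoc]
          all_goals rfl

-- ===== VERDICT (by name: the statement is the Claim_ definition above) =====
theorem part1NaughtyCheck_spec : Claim_equal_part1NaughtyCheck := by
  intro line _
  unfold Spec_part1NaughtyCheck part1NaughtyCheck part1NaughtyCheck_alt
  simp only []
  rw [PySem.List.foldl_pyRange_zero_pyGetD' line.toList ' '
        (fun v c => if ("aeiou".toList).contains c then v + 1 else v) 0]
  rw [pv_altLoop_eq]
  simp only [Nat.zero_add, Bool.false_or]
  rw [pv_countV_eq, pv_foldl_or, pv_foldl_or]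
  simp only [Bool.false_or, List.any_cons, List.any_nil, Bool.or_false]
  rw [pv_pyRange_double, pv_double_eq]
  rw [pv_infix_pair, pv_infix_pair, pv_infix_pair, pv_infix_pair]
  rw [← pv_combo_eq]
  simp [Bool.or_assoc]
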